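-- pv_equiv track=rewrite | github.com/Lepotato82/genate-ai-WIP | tests/test_input_layer_integration.py | _signal_keys_in
-- ===== SOURCE A (Python) =====
-- _SIGNAL_TOKEN_KEYS = {"color", "bg", "background", "font", "accent", "brand", "primary"}
--
-- def _signal_keys_in(named_colors: dict[str, str]) -> list[str]:
--     found = []
--     for k in named_colors:
--         kl = k.lower()
--         for sig in _SIGNAL_TOKEN_KEYS:
--             if sig in kl:
--                 found.append(k)
--                 break
--     return found
-- ===== SOURCE B (Python) =====
-- _SIGNAL_TOKEN_KEYS = {"color", "bg", "background", "font", "accent", "brand", "primary"}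
--
-- # First-letter dispatch table built once: only tokens that can start at a
-- # position are prefix-tested there, so each key is scanned in a single pass.
-- _BY_FIRST = {}
-- for _t in sorted(_SIGNAL_TOKEN_KEYS):
--     _BY_FIRST.setdefault(_t[0], []).append(_t)
--
--
-- def _contains_signal(kl):
--     for j in range(len(kl)):
--         cands = _BY_FIRST.get(kl[j])
--         if cands is not None and any(kl.startswith(t, j) for t in cands):
--             return True
--     return False
--
--
-- def _signal_keys_in(named_colors: dict[str, str]) -> list[str]:
--     return [k for k in named_colors if _contains_signal(k.lower())]
-- ===== Notes on version B (the rewrite author's own statement) =====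
-- stated objective: alternative
-- what changed: Replaces the per-key inner loop over the whole token set (each doing its own full substring scan) by a single left-to-right pass over the lowered key that, at each position, prefix-tests only the tokens indexed under that position's first letter in a dispatch table built once at module load.
import Mathlib
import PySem

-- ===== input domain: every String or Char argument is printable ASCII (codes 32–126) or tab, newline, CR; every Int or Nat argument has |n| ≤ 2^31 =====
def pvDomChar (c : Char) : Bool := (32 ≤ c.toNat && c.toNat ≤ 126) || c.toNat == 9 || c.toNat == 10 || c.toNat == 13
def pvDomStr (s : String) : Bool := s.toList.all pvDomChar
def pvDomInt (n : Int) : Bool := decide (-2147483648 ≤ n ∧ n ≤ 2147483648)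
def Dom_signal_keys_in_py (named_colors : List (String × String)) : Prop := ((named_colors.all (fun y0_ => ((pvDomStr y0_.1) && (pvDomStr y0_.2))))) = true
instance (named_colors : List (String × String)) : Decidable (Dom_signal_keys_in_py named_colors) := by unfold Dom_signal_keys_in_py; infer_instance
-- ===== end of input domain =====

-- B replaces the per-key loop over all tokens by a single left-to-right scan of the
-- lowered key with a first-letter dispatch table (objective: alternative structure).


-- ===== PORT A =====
-- The module constant _SIGNAL_TOKEN_KEYS is a set of string literals; the inner loop
-- iterates it in Python's (hash-determined) set order, but the loop only decides an
-- existence ("some token is a substring, then append k once and break"), so the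
-- iteration order cannot affect the result; we fix the literal's written order.
def pvTokensA : List String := ["color", "bg", "background", "font", "accent", "brand", "primary"]

-- 'for sig in _SIGNAL_TOKEN_KEYS: if sig in kl: found.append(k); break' — the inner
-- loop, returning whether it appended.
def pvInnerA (kl : String) : List String → Bool
  | [] => false
  | sig :: rest => if PySem.Str.isIn sig kl then true else pvInnerA kl rest

def signal_keys_in_py (named_colors : List (String × String)) : List String :=
  named_colors.foldl (fun found p =>
    let kl := PySem.Str.lower p.1
    if pvInnerA kl pvTokensA then found ++ [p.1] else found) []

-- ===== PORT B =====
-- _BY_FIRST, the module-level dispatch table, written out as the dict the module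
-- initialisation loop produces (sorted tokens grouped by first letter, in order).
def pvByFirst : PySem.Dict Char (List String) :=
  PySem.Dict.mk [('a', ["accent"]), ('b', ["background", "bg", "brand"]),
                 ('c', ["color"]), ('f', ["font"]), ('p', ["primary"])]

-- _contains_signal: 'for j in range(len(kl))' walked as structural recursion on the
-- suffix starting at j; kl[j] is the suffix's head and kl.startswith(t, j) is exactly
-- 't.toList.isPrefixOf (suffix at j)' (exact: j is a valid in-range index here).
def pvContainsSignal : List Char → Bool
  | [] => false
  | c :: rest =>
    (match pvByFirst.get? c with
     | some cands => cands.any (fun t => t.toList.isPrefixOf (c :: rest))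
     | none => false) || pvContainsSignal rest

def signal_keys_in_py_alt (named_colors : List (String × String)) : List String :=
  (named_colors.map (fun p => p.1)).filter
    (fun k => pvContainsSignal (PySem.Str.lower k).toList)

-- ===== PRECONDITION & SPEC =====
def Spec_signal_keys_in_py (named_colors : List (String × String)) (out : List String) : Prop := out = signal_keys_in_py_alt named_colors
instance (named_colors : List (String × String)) (out : List String) : Decidable (Spec_signal_keys_in_py named_colors out) := by unfold Spec_signal_keys_in_py; infer_instance

-- ===== CLAIM (what is proved, stated in full; the proofs are below) =====
def Claim_equal_signal_keys_in_py : Prop := ∀ (named_colors : List (String × String)), Dom_signal_keys_in_py named_colors → Spec_signal_keys_in_py named_colors (signal_keys_in_py named_colors)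

-- ===== LEMMAS AND PROOFS =====

-- A's inner loop-with-break is the 'any' of the substring tests.
theorem pvInnerA_eq_any (kl : String) (ts : List String) :
    pvInnerA kl ts = ts.any (fun sig => PySem.Str.isIn sig kl) := by
  induction ts with
  | nil => rfl
  | cons sig rest ih =>
    rw [pvInnerA, List.any_cons, ih]
    cases h : PySem.Str.isIn sig kl <;> simp

-- The dispatch-table lookup at a nonempty suffix tests exactly the tokens that could
-- match there: it equals the 'any' over ALL tokens (the dropped ones start with a
-- different letter, so their prefix test is false anyway).
theorem pvDispatch_eq_any (c : Char) (rest : List Char) :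
    (match pvByFirst.get? c with
     | some cands => cands.any (fun t => t.toList.isPrefixOf (c :: rest))
     | none => false) = pvTokensA.any (fun t => t.toList.isPrefixOf (c :: rest)) := by
  by_cases ha : c = 'a'
  · subst ha; simp [pvByFirst, pvTokensA, PySem.Dict.get?_mk_cons, List.isPrefixOf]
  · by_cases hb : c = 'b'
    · subst hb
      simp [pvByFirst, pvTokensA, PySem.Dict.get?_mk_cons, List.isPrefixOf]
      ac_rfl
    · by_cases hc : c = 'c'
      · subst hc; simp [pvByFirst, pvTokensA, PySem.Dict.get?_mk_cons, List.isPrefixOf]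
      · by_cases hf : c = 'f'
        · subst hf; simp [pvByFirst, pvTokensA, PySem.Dict.get?_mk_cons, List.isPrefixOf]
        · by_cases hp : c = 'p'
          · subst hp; simp [pvByFirst, pvTokensA, PySem.Dict.get?_mk_cons, List.isPrefixOf]
          · simp [pvByFirst, pvTokensA, PySem.Dict.get?,
                  Ne.symm ha, Ne.symm hb, Ne.symm hc, Ne.symm hf, Ne.symm hp,
                  List.isPrefixOf]

-- The scan finds a match iff some token is a prefix of some suffix.
theorem pvContainsSignal_iff (s : List Char) :
    pvContainsSignal s = true ↔ ∃ t ∈ pvTokensA, ∃ j, t.toList <+: s.drop j := by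
  induction s with
  | nil =>
    simp [pvContainsSignal, pvTokensA]
  | cons c rest ih =>
    rw [pvContainsSignal, Bool.or_eq_true, ih, pvDispatch_eq_any, List.any_eq_true]
    constructor
    · rintro (⟨t, ht, hpre⟩ | ⟨t, ht, j, hpre⟩)
      · exact ⟨t, ht, 0, by simpa using hpre⟩
      · exact ⟨t, ht, j + 1, by simpa using hpre⟩
    · rintro ⟨t, ht, j, hpre⟩
      cases j with
      | zero => exact Or.inl ⟨t, ht, by simpa using hpre⟩
      | succ j => exact Or.inr ⟨t, ht, j, by simpa using hpre⟩

-- Per key: A's inner loop and B's scan agree.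
theorem pvPerKey (k : String) :
    pvInnerA (PySem.Str.lower k) pvTokensA
      = pvContainsSignal (PySem.Str.lower k).toList := by
  rw [pvInnerA_eq_any]
  rcases Bool.eq_false_or_eq_true (pvContainsSignal (PySem.Str.lower k).toList) with h | h
  all_goals rw [h]
  · rw [List.any_eq_true]
    rw [pvContainsSignal_iff] at h
    rcases h with ⟨t, ht, j, hpre⟩
    refine ⟨t, ht, ?_⟩
    have : PySem.Chars.isIn t.toList (PySem.Str.lower k).toList = true := by
      rw [← PySem.Chars.exists_prefix_drop_iff_isIn]; exact ⟨j, hpre⟩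
    simpa [PySem.Str.isIn_eq] using this
  · rw [List.any_eq_false]
    intro t ht hIn
    rw [Bool.eq_false_iff] at h
    apply h
    rw [pvContainsSignal_iff]
    refine ⟨t, ht, ?_⟩
    rw [PySem.Chars.exists_prefix_drop_iff_isIn]
    simpa [PySem.Str.isIn_eq] using hIn

-- ===== VERDICT (by name: the statement is the Claim_ definition above) =====
theorem signal_keys_in_py_spec : Claim_equal_signal_keys_in_py := by
  intro named_colors _
  unfold Spec_signal_keys_in_py signal_keys_in_py signal_keys_in_py_alt
  rw [PySem.List.foldl_append_if
        (p := fun p : String × String => pvInnerA (PySem.Str.lower p.1) pvTokensA)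
        (f := fun p : String × String => p.1)]
  rw [List.filter_map, List.nil_append]
  congr 1
  apply List.filter_congr
  intro p _
  simp only [Function.comp_apply]
  rw [pvPerKey p.1]
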